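-- pv_equiv track=rewrite | github.com/kardantel/Amazon-Robots | Algorithm3.py | calcular_posicion_ruta
-- ===== SOURCE A (Python) =====
-- def calcular_posicion_ruta(lst_path, start):
--     '''Función que devuelve la ruta que encuentra el algoritmo A* dependiendo
--     de la posición inicial y destino de los elementos que interactúan.'''
--     row = start[0]
--     col = start[1]
--     ruta = []
--     for i in lst_path:
--         if i == 'MoverAbajo->':
--             row += 1
--             ruta.append([i + " ", (row, col)])
--         if i == 'MoverArriba->':
--             row -= 1
--             ruta.append([i + " ", (row, col)])
--         if i == 'MoverDerecha->':
--             col += 1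
--             ruta.append([i + " ", (row, col)])
--         if i == 'MoverIzquierda->':
--             col -= 1
--             ruta.append([i + " ", (row, col)])
--     return ruta
-- ===== SOURCE B (Python) =====
-- DELTAS = {
--     'MoverAbajo->': (1, 0),
--     'MoverArriba->': (-1, 0),
--     'MoverDerecha->': (0, 1),
--     'MoverIzquierda->': (0, -1),
-- }
--
-- def _cumsum(s, xs):
--     """Prefix sums of xs starting from s (s excluded)."""
--     if not xs:
--         return []
--     return [s + xs[0]] + _cumsum(s + xs[0], xs[1:])
--
-- def calcular_posicion_ruta(lst_path, start):
--     deltas = [DELTAS[c] for c in lst_path if c in DELTAS]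
--     rows = _cumsum(start[0], [d[0] for d in deltas])
--     cols = _cumsum(start[1], [d[1] for d in deltas])
--     labels = [c + " " for c in lst_path if c in DELTAS]
--     return [[lab, (r, c)] for lab, r, c in zip(labels, rows, cols)]
-- ===== Notes on version B (the rewrite author's own statement) =====
-- stated objective: alternative
-- what changed: Instead of one stateful loop with four equality branches, B stages the computation: it filters the recognised commands through a DELTAS table, splits them into independent row- and column-delta streams, turns each stream into positions by a recursive prefix-sum, and zips the labels with the resulting coordinate pairs.
import Mathlib
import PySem

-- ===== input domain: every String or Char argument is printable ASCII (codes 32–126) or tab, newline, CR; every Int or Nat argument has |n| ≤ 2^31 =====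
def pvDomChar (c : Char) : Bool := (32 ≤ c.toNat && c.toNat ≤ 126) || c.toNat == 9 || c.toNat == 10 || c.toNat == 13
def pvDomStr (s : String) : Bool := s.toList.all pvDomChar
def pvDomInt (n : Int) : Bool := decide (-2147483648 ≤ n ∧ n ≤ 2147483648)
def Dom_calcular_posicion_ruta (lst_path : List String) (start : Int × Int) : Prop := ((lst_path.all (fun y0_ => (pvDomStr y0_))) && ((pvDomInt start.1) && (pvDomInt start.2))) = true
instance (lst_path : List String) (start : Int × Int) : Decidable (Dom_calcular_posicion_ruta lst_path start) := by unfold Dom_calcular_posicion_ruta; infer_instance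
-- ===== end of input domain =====

-- B replaces the stateful four-branch loop by staged passes: a DELTAS-table filter, independent row/col prefix-sum streams, and a final zip (same return value; alternative decomposition).
-- ===== PORT A =====
def calcAuxA (lst : List String) (row col : Int) : List (String × (Int × Int)) :=
  match lst with
  | [] => []
  | i :: rest =>
    -- four sequential (non-elif) ifs, each updating state and appending, exactly as in A
    let s1 : Int × Int × List (String × (Int × Int)) :=
      if i = "MoverAbajo->" then (row + 1, col, [(i ++ " ", (row + 1, col))]) else (row, col, [])
    let s2 : Int × Int × List (String × (Int × Int)) :=
      if i = "MoverArriba->" then (s1.1 - 1, s1.2.1, s1.2.2 ++ [(i ++ " ", (s1.1 - 1, s1.2.1))]) else s1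
    let s3 : Int × Int × List (String × (Int × Int)) :=
      if i = "MoverDerecha->" then (s2.1, s2.2.1 + 1, s2.2.2 ++ [(i ++ " ", (s2.1, s2.2.1 + 1))]) else s2
    let s4 : Int × Int × List (String × (Int × Int)) :=
      if i = "MoverIzquierda->" then (s3.1, s3.2.1 - 1, s3.2.2 ++ [(i ++ " ", (s3.1, s3.2.1 - 1))]) else s3
    s4.2.2 ++ calcAuxA rest s4.1 s4.2.1

def calcular_posicion_ruta (lst_path : List String) (start : Int × Int) : List (String × (Int × Int)) :=
  calcAuxA lst_path start.1 start.2

-- ===== PORT B =====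
-- B-side: DELTAS table, staged passes: filter, split into delta streams, prefix sums, zip
def pvDeltas : PySem.Dict String (Int × Int) :=
  (((PySem.Dict.empty.insert "MoverAbajo->" ((1 : Int), (0 : Int))).insert "MoverArriba->" ((-1 : Int), (0 : Int))).insert "MoverDerecha->" ((0 : Int), (1 : Int))).insert "MoverIzquierda->" ((0 : Int), (-1 : Int))

-- _cumsum: prefix sums of xs starting from s (s excluded), recursive as in Source B
def pvCumsum (s : Int) (xs : List Int) : List Int :=
  match xs with
  | [] => []
  | x :: rest => (s + x) :: pvCumsum (s + x) rest

def calcular_posicion_ruta_alt (lst_path : List String) (start : Int × Int) : List (String × (Int × Int)) :=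
  let deltas := (lst_path.filter (fun c => (pvDeltas.get? c).isSome)).map (fun c => (pvDeltas.get? c).getD (0, 0))
  let rows := pvCumsum start.1 (deltas.map (fun d => d.1))
  let cols := pvCumsum start.2 (deltas.map (fun d => d.2))
  let labels := (lst_path.filter (fun c => (pvDeltas.get? c).isSome)).map (fun c => c ++ " ")
  labels.zip (rows.zip cols)

-- ===== PRECONDITION & SPEC =====
def Spec_calcular_posicion_ruta (lst_path : List String) (start : Int × Int) (out : List (String × (Int × Int))) : Prop := out = calcular_posicion_ruta_alt lst_path start
instance (lst_path : List String) (start : Int × Int) (out : List (String × (Int × Int))) : Decidable (Spec_calcular_posicion_ruta lst_path start out) := by unfold Spec_calcular_posicion_ruta; infer_instance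

-- ===== CLAIM (what is proved, stated in full; the proofs are below) =====
def Claim_equal_calcular_posicion_ruta : Prop := ∀ (lst_path : List String) (start : Int × Int), Dom_calcular_posicion_ruta lst_path start → Spec_calcular_posicion_ruta lst_path start (calcular_posicion_ruta lst_path start)

-- ===== LEMMAS AND PROOFS =====

-- ===== VERDICT (by name: the statement is the Claim_ definition above) =====
theorem aux_eq (lst : List String) : ∀ (row col : Int),
    calcAuxA lst row col =
      (let f := lst.filter (fun c => (pvDeltas.get? c).isSome)
       let deltas := f.map (fun c => (pvDeltas.get? c).getD (0, 0))
       (f.map (fun c => c ++ " ")).zip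
         ((pvCumsum row (deltas.map (fun d => d.1))).zip (pvCumsum col (deltas.map (fun d => d.2))))) := by
  induction lst with
  | nil => intro row col; rfl
  | cons i rest ih =>
    intro row col
    by_cases h1 : i = "MoverAbajo->"
    · subst h1; simp [calcAuxA, pvCumsum, List.filter, pvDeltas, PySem.Dict.get?,
        PySem.Dict.insert, PySem.Dict.empty, ih]
    · by_cases h2 : i = "MoverArriba->"
      · subst h2; simp [calcAuxA, pvCumsum, List.filter, pvDeltas, PySem.Dict.get?,
          PySem.Dict.insert, PySem.Dict.empty, sub_eq_add_neg, ih]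
      · by_cases h3 : i = "MoverDerecha->"
        · subst h3; simp [calcAuxA, pvCumsum, List.filter, pvDeltas, PySem.Dict.get?,
            PySem.Dict.insert, PySem.Dict.empty, ih]
        · by_cases h4 : i = "MoverIzquierda->"
          · subst h4; simp [calcAuxA, pvCumsum, List.filter, pvDeltas, PySem.Dict.get?,
              PySem.Dict.insert, PySem.Dict.empty, sub_eq_add_neg, ih]
          · have e1 : ("MoverAbajo->" == i) = false := by simp [Ne.symm h1]
            have e2 : ("MoverArriba->" == i) = false := by simp [Ne.symm h2]
            have e3 : ("MoverDerecha->" == i) = false := by simp [Ne.symm h3]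
            have e4 : ("MoverIzquierda->" == i) = false := by simp [Ne.symm h4]
            simp [calcAuxA, List.filter, List.find?, pvDeltas, PySem.Dict.get?,
              PySem.Dict.insert, PySem.Dict.empty, h1, h2, h3, h4, e1, e2, e3, e4, ih]

theorem calcular_posicion_ruta_spec : Claim_equal_calcular_posicion_ruta := by
  intro lst_path start _
  unfold Spec_calcular_posicion_ruta calcular_posicion_ruta calcular_posicion_ruta_alt
  exact aux_eq lst_path start.1 start.2
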